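-- pv_equiv track=rewrite | github.com/dvirla/Balancing_Textual_Datasets | T5/fine_tuning_T5/create_labeled_data.py | replace_X_with_extra_id
-- ===== SOURCE A (Python) =====
-- def replace_X_with_extra_id(text):
--     i = 1
--     new_text = []
--     for word in text.split():
--         if word == 'X':
--             new_text.append(f'<extra_id_{i}>')
--             i +=1
--             if i > 100:
--                 break
--         else:
--             new_text.append(word)
--     return ' '.join(new_text)
-- ===== SOURCE B (Python) =====
-- def replace_X_with_extra_id(text):
--     words = text.split()
--     xs = [j for j, w in enumerate(words) if w == 'X']
--     if len(xs) >= 100: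
--         words = words[:xs[99] + 1]
--     out = []
--     i = 1
--     for w in words:
--         if w == 'X':
--             out.append(f'<extra_id_{i}>')
--             i += 1
--         else:
--             out.append(w)
--     return ' '.join(out)
-- ===== Notes on version B (the rewrite author's own statement) =====
-- stated objective: alternative
-- what changed: Replaces the single break-on-101 loop by a different decomposition: collect the indices of 'X' tokens, truncate the word list just after the 100th X if there are that many, then run a plain break-free replacement pass.
import Mathlib
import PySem

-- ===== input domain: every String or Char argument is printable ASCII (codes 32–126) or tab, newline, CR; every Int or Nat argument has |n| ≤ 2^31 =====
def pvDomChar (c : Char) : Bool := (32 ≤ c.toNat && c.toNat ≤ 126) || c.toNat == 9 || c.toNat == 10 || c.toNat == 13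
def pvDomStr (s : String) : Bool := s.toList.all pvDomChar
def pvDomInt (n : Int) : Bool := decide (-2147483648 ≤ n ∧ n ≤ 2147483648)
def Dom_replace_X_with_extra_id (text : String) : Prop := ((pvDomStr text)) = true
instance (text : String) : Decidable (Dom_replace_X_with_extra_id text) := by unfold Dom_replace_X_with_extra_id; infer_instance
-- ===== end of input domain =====

-- B re-decomposes A's break-on-101 loop as: find the X positions, truncate after the 100th X, then a plain replacement pass (objective: alternative decomposition, same cost).

-- f'<extra_id_{i}>'
def extraTok (i : Int) : String := PySem.Str.join "" ["<extra_id_", PySem.Int.toStr i, ">"]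

-- ===== PORT A =====
-- A's for-loop with counter i and break once i > 100
def loopA : List String → Int → List String
  | [], _ => []
  | w :: ws, i =>
    if w == "X" then
      if i + 1 > 100 then [extraTok i]
      else extraTok i :: loopA ws (i + 1)
    else w :: loopA ws i

def replace_X_with_extra_id (text : String) : String :=
  PySem.Str.join " " (loopA (PySem.Str.split₀ text) 1)

-- ===== PORT B =====
-- B's break-free replacement pass
def replB : List String → Int → List String
  | [], _ => []
  | w :: ws, i =>
    if w == "X" then extraTok i :: replB ws (i + 1)
    else w :: replB ws i

def replace_X_with_extra_id_alt (text : String) : String :=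
  let words := PySem.Str.split₀ text
  let xs := ((PySem.List.enumerate words 0).filter (fun p => p.2 == "X")).map (·.1)
  let words' := if 100 ≤ xs.length
    then PySem.List.slice words none (some (xs.getD 99 0 + 1))  -- words[:xs[99]+1]
    else words
  PySem.Str.join " " (replB words' 1)

-- ===== PRECONDITION & SPEC =====
def Spec_replace_X_with_extra_id (text : String) (out : String) : Prop := out = replace_X_with_extra_id_alt text
instance (text : String) (out : String) : Decidable (Spec_replace_X_with_extra_id text out) := by unfold Spec_replace_X_with_extra_id; infer_instance

-- ===== CLAIM (what is proved, stated in full; the proofs are below) =====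
def Claim_equal_replace_X_with_extra_id : Prop := ∀ (text : String), Dom_replace_X_with_extra_id text → Spec_replace_X_with_extra_id text (replace_X_with_extra_id text)

-- ===== LEMMAS AND PROOFS =====

-- spec-level list of 0-based Nat positions of "X"
def xposN : List String → List Nat
  | [] => []
  | w :: ws => if w = "X" then 0 :: (xposN ws).map (· + 1) else (xposN ws).map (· + 1)

-- Int positions of "X" starting at offset s (proof-side mirror of B's enumerate/filter/map)
def xposI : List String → Int → List Int
  | [], _ => []
  | w :: ws, s => if w = "X" then s :: xposI ws (s + 1) else xposI ws (s + 1)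

-- truncate just after the k-th "X" (whole list if fewer than k X's)
def truncK : Nat → List String → List String
  | _, [] => []
  | k, w :: ws =>
    if w = "X" then (if k ≤ 1 then [w] else w :: truncK (k - 1) ws)
    else w :: truncK k ws

theorem getD_map_add_one (l : List Nat) (j : Nat) (hj : j < l.length) :
    (l.map (· + 1)).getD j 0 = l.getD j 0 + 1 := by
  simp [List.getD, hj]

theorem enum_filter_map_eq_xposI (ws : List String) (s : Int) :
    (((PySem.List.enumerate ws s).filter (fun p => p.2 == "X")).map (·.1))
      = xposI ws s := by
  induction ws generalizing s with
  | nil => simp [PySem.List.enumerate_nil, xposI]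
  | cons w ws ih =>
    rw [PySem.List.enumerate_cons, List.filter_cons]
    by_cases h : w = "X"
    · simp only [h, beq_self_eq_true, if_true, List.map_cons, ih (s + 1)]
      simp [xposI]
    · have h2 : (((s, w).2 == "X")) = false := by simpa using h
      simp only [h2, Bool.false_eq_true, ite_false]
      rw [ih (s + 1)]
      simp [xposI, h]

theorem length_xposI (ws : List String) (s : Int) :
    (xposI ws s).length = (xposN ws).length := by
  induction ws generalizing s with
  | nil => simp [xposI, xposN]
  | cons w ws ih =>
    by_cases h : w = "X" <;> simp [xposI, xposN, h, ih (s + 1)]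

theorem getD_xposI (ws : List String) (s : Int) (j : Nat) (hj : j < (xposN ws).length) :
    (xposI ws s).getD j 0 = s + ((xposN ws).getD j 0 : Nat) := by
  induction ws generalizing s j with
  | nil => simp [xposN] at hj
  | cons w ws ih =>
    by_cases h : w = "X"
    · match j with
      | 0 => simp [xposI, xposN, h]
      | j + 1 =>
        have hj' : j < (xposN ws).length := by
          simpa [xposN, h] using hj
        simp only [xposI, xposN, if_pos h, List.getD_cons_succ]
        rw [ih (s + 1) j hj', getD_map_add_one _ _ hj']
        push_cast
        ring
    · have hj' : j < (xposN ws).length := by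
        simpa [xposN, h] using hj
      simp only [xposI, xposN, if_neg h]
      rw [ih (s + 1) j hj', getD_map_add_one _ _ hj']
      push_cast
      ring

theorem loopA_eq_replB_truncK (ws : List String) (k : Nat) (hk1 : 1 ≤ k) (hk2 : k ≤ 100) :
    loopA ws (101 - (k : Int)) = replB (truncK k ws) (101 - (k : Int)) := by
  induction ws generalizing k with
  | nil => simp [loopA, truncK, replB]
  | cons w ws ih =>
    by_cases h : w = "X"
    · by_cases h1 : k ≤ 1
      · have hk : k = 1 := le_antisymm h1 hk1
        subst hk
        norm_num [loopA, truncK, replB, h]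
      · have hlt : ¬ (101 - (k : Int) + 1 > 100) := by omega
        have harg : 101 - (k : Int) + 1 = 101 - ((k - 1 : Nat) : Int) := by omega
        simp only [loopA, truncK, replB, h, beq_self_eq_true, if_true, if_neg hlt, if_neg h1]
        rw [harg, ih (k - 1) (by omega) (by omega)]
    · simp [loopA, truncK, replB, h, ih k hk1 hk2]

theorem take_xposN_eq_truncK (ws : List String) (k : Nat) (hk : 1 ≤ k) :
    (if k ≤ (xposN ws).length
      then ws.take ((xposN ws).getD (k - 1) 0 + 1)
      else ws) = truncK k ws := by
  induction ws generalizing k with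
  | nil => simp [xposN, truncK]
  | cons w ws ih =>
    by_cases h : w = "X"
    · by_cases h1 : k ≤ 1
      · have hk1 : k = 1 := le_antisymm h1 hk
        subst hk1
        simp [xposN, truncK, h, List.getD]
      · have hlen : (xposN (w :: ws)).length = (xposN ws).length + 1 := by
          simp [xposN, h]
        by_cases hin : k ≤ (xposN (w :: ws)).length
        · have hin' : k - 1 ≤ (xposN ws).length := by omega
          have hidx : k - 2 < (xposN ws).length := by omega
          have hgd : (xposN (w :: ws)).getD (k - 1) 0
              = (xposN ws).getD (k - 2) 0 + 1 := by
            have hstep : k - 1 = (k - 2) + 1 := by omega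
            rw [show xposN (w :: ws) = 0 :: (xposN ws).map (· + 1) from by simp [xposN, h],
              hstep, List.getD_cons_succ, getD_map_add_one _ _ hidx]
          rw [if_pos hin, hgd]
          have hrw : (xposN ws).getD (k - 2) 0 + 1 + 1
              = ((xposN ws).getD ((k - 1) - 1) 0 + 1) + 1 := by
            rw [Nat.sub_sub]
          rw [hrw, List.take_succ_cons]
          have hih := ih (k - 1) (by omega)
          rw [if_pos hin'] at hih
          rw [hih]
          simp [truncK, h, h1]
        · have hin' : ¬ (k - 1 ≤ (xposN ws).length) := by omega
          rw [if_neg hin]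
          have hih := ih (k - 1) (by omega)
          rw [if_neg hin'] at hih
          simp [truncK, h, h1, ← hih]
    · have hlen : (xposN (w :: ws)) = (xposN ws).map (· + 1) := by
        simp [xposN, h]
      by_cases hin : k ≤ (xposN (w :: ws)).length
      · have hin' : k ≤ (xposN ws).length := by
          simpa [hlen] using hin
        have hidx : k - 1 < (xposN ws).length := by omega
        have hgd : (xposN (w :: ws)).getD (k - 1) 0
            = (xposN ws).getD (k - 1) 0 + 1 := by
          rw [hlen, getD_map_add_one _ _ hidx]
        rw [if_pos hin, hgd, List.take_succ_cons]
        have hih := ih k hk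
        rw [if_pos hin'] at hih
        rw [hih]
        simp [truncK, h]
      · have hin' : ¬ (k ≤ (xposN ws).length) := by
          simpa [hlen] using hin
        rw [if_neg hin]
        have hih := ih k hk
        rw [if_neg hin'] at hih
        simp [truncK, h, ← hih]

theorem main_lists (ws : List String) :
    loopA ws 1 =
      replB (if 100 ≤ ((((PySem.List.enumerate ws 0).filter (fun p => p.2 == "X")).map (·.1)).length)
        then PySem.List.slice ws none
          (some (((((PySem.List.enumerate ws 0).filter (fun p => p.2 == "X")).map (·.1))).getD 99 0 + 1))
        else ws) 1 := by
  rw [enum_filter_map_eq_xposI ws 0, length_xposI ws 0]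
  by_cases hin : 100 ≤ (xposN ws).length
  · have hidx : 99 < (xposN ws).length := by omega
    rw [if_pos hin, getD_xposI ws 0 99 hidx, zero_add]
    have hcast : ((((xposN ws).getD 99 0 : Nat) : Int) + 1)
        = (((((xposN ws).getD 99 0) + 1 : Nat)) : Int) := by push_cast; ring
    rw [hcast, PySem.List.slice_to_natCast]
    have ht := take_xposN_eq_truncK ws 100 (by omega)
    rw [if_pos hin] at ht
    rw [show ((xposN ws).getD 99 0 + 1) = ((xposN ws).getD (100 - 1) 0 + 1) from rfl, ht]
    have hmain := loopA_eq_replB_truncK ws 100 (by omega) (by omega)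
    norm_num at hmain
    exact hmain
  · rw [if_neg hin]
    have ht := take_xposN_eq_truncK ws 100 (by omega)
    rw [if_neg hin] at ht
    have hmain := loopA_eq_replB_truncK ws 100 (by omega) (by omega)
    norm_num at hmain
    rw [← ht] at hmain
    exact hmain

-- ===== VERDICT (by name: the statement is the Claim_ definition above) =====
theorem replace_X_with_extra_id_spec : Claim_equal_replace_X_with_extra_id := by
  intro text _
  unfold Spec_replace_X_with_extra_id replace_X_with_extra_id replace_X_with_extra_id_alt
  rw [main_lists (PySem.Str.split₀ text)]
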